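-- pv_equiv track=rewrite | github.com/katryo/subtask_search | analyzer.py | is_including_invalid_word
-- ===== SOURCE A (Python) =====
-- def is_including_invalid_word(info):
--     head = info[0:4]
--     invalid = False
--     invalid_words = [
--         ',', '.', '…', '(', ')', '-',
--         '/', ':', ';', '&', '%', '％',
--         '~', '〜', '≪', '≫', '[', ']',
--         '|', '"'
--     ]
--     for invalid_word in invalid_words:
--         if invalid_word in head:
--             invalid = True
--             break
--     return invalid
-- ===== SOURCE B (Python) =====
-- _INVALID_CHARS = frozenset(
--     ',.…()-/:;&%％~〜≪≫[]|"'
-- )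
--
-- def is_including_invalid_word(info):
--     return any(c in _INVALID_CHARS for c in info[0:4])
-- ===== Notes on version B (the rewrite author's own statement) =====
-- stated objective: idiomatic
-- what changed: B loops over the characters of the 4-char head testing set membership (any(c in frozenset)), instead of A's loop over the 20-word list testing substring containment against the head with an explicit flag and break.
import Mathlib
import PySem

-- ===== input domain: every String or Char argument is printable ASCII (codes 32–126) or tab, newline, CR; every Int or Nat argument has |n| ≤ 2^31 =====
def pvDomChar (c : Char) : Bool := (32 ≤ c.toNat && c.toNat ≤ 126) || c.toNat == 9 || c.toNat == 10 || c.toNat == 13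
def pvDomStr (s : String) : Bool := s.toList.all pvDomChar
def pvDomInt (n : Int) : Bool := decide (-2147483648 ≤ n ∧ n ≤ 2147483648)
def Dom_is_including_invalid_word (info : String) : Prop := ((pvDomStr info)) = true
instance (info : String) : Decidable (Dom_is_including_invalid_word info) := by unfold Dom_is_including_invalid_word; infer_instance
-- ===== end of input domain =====

-- B replaces A's flag-and-break loop over a 20-word list (substring test per word)
-- by a single pass over the head's characters with one set-membership test (idiomatic).

-- ===== PORT A =====
def invalidWordsA : List String :=
  [",", ".", "…", "(", ")", "-",
   "/", ":", ";", "&", "%", "％",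
   "~", "〜", "≪", "≫", "[", "]",
   "|", "\""]

-- the for-loop with `invalid = True; break`: returns at the first word contained in head
def loopA (head : String) : List String → Bool
  | [] => false
  | w :: ws => if PySem.Str.isIn w head then true else loopA head ws

def is_including_invalid_word (info : String) : Bool :=
  loopA (String.ofList (PySem.List.slice info.toList (some 0) (some 4))) invalidWordsA

-- ===== PORT B =====
def invalidCharSet : PySem.Set Char :=
  PySem.Set.ofList
    [',', '.', '…', '(', ')', '-',
     '/', ':', ';', '&', '%', '％',
     '~', '〜', '≪', '≫', '[', ']',
     '|', '"']

def is_including_invalid_word_alt (info : String) : Bool :=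
  (PySem.List.slice info.toList (some 0) (some 4)).any
    (fun c => PySem.Set.contains invalidCharSet c)

-- ===== PRECONDITION & SPEC =====
def Spec_is_including_invalid_word (info : String) (out : Bool) : Prop := out = is_including_invalid_word_alt info
instance (info : String) (out : Bool) : Decidable (Spec_is_including_invalid_word info out) := by unfold Spec_is_including_invalid_word; infer_instance

-- ===== CLAIM (what is proved, stated in full; the proofs are below) =====
def Claim_equal_is_including_invalid_word : Prop := ∀ (info : String), Dom_is_including_invalid_word info → Spec_is_including_invalid_word info (is_including_invalid_word info)

-- ===== LEMMAS AND PROOFS =====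

-- A's break-loop is `any` of the membership tests
theorem loopA_eq_any (head : String) (ws : List String) :
    loopA head ws = ws.any (fun w => PySem.Str.isIn w head) := by
  induction ws with
  | nil => rfl
  | cons w ws ih =>
    rw [List.any_cons, ← ih,
      show loopA head (w :: ws) = if PySem.Str.isIn w head then true else loopA head ws from rfl]
    by_cases h : PySem.Str.isIn w head = true
    · rw [if_pos h, h, Bool.true_or]
    · rw [if_neg h]
      simp only [Bool.not_eq_true] at h
      rw [h, Bool.false_or]

-- a one-character substring test is character membership
theorem isIn_single (c : Char) (h : String) :
    PySem.Str.isIn (String.ofList [c]) h = h.toList.contains c := by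
  rcases hb : h.toList.contains c with _ | _
  · rw [← Bool.not_eq_true, PySem.Str.isIn_iff_infix]
    intro hinf
    have : c ∈ h.toList := hinf.sublist.subset (by simp)
    simp_all
  · rw [PySem.Str.isIn_iff_infix]
    simp only [List.contains_iff_mem] at hb
    obtain ⟨s, t, hst⟩ := List.append_of_mem hb
    exact ⟨s, t, by simp [hst]⟩

-- A's word list is exactly the single-character strings of B's character list
theorem words_eq :
    invalidWordsA =
      [',', '.', '…', '(', ')', '-', '/', ':', ';', '&', '%', '％',
       '~', '〜', '≪', '≫', '[', ']', '|', '"'].map (fun c => String.ofList [c]) := by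
  decide

-- the traversal order can be swapped: some element of l lies in m iff some element of m lies in l
theorem any_contains_comm (l m : List Char) :
    l.any (fun c => m.contains c) = m.any (fun c => l.contains c) := by
  rw [Bool.eq_iff_iff]
  simp only [List.any_eq_true, List.contains_iff_mem]
  exact ⟨fun ⟨c, h1, h2⟩ => ⟨c, h2, h1⟩, fun ⟨c, h1, h2⟩ => ⟨c, h2, h1⟩⟩

theorem is_including_invalid_word_eq_alt (info : String) :
    is_including_invalid_word info = is_including_invalid_word_alt info := by
  unfold is_including_invalid_word is_including_invalid_word_alt
  rw [loopA_eq_any, words_eq, List.any_map]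
  simp only [Function.comp_def, isIn_single, String.toList_ofList]
  rw [any_contains_comm]
  have hset : invalidCharSet =
      [',', '.', '…', '(', ')', '-', '/', ':', ';', '&', '%', '％',
       '~', '〜', '≪', '≫', '[', ']', '|', '"'] := by decide
  simp only [hset, PySem.Set.contains_eq_listContains]

-- ===== VERDICT (by name: the statement is the Claim_ definition above) =====
theorem is_including_invalid_word_spec : Claim_equal_is_including_invalid_word :=
  fun info _ => is_including_invalid_word_eq_alt info
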